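-- pv_equiv track=rewrite | github.com/srajsonu/CodeChef | Jan Long Challenge 2021/4. Point Of Impact.py | solve
-- ===== SOURCE A (Python) =====
-- def solve(n, k, x, y):
--     i = x
--     j = y
--     if not n or not k or x < 0 or y < 0: return (0, 0)
--     if i == j and k <= 0:
--         return (i, j)
--     if i == j and k > 0:
--         return (n, n)
--     ans = []
--     dir = 0
--     cnt = 0
--     while cnt < 4:
--         if dir == 0:
--             idx = max(i, j)
--             i += (n - idx)
--             j += (n - idx)
--             dir = 1
--         elif dir == 1:
--             idx = min(i, j)
--             i -= (n - idx)
--             j += (n - idx)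
--             dir = 2
--         elif dir == 2:
--             idx = min(i, j)
--             i -= (n - idx)
--             j -= (n - idx)
--             dir = 3
--         else:
--             idx = max(i, j)
--             i += (n - idx)
--             j -= (n - idx)
--             dir = 0
--         ans.append((i, j))
--         cnt += 1
--
--     if k <= 4:
--         return ans[k - 1]
--     return ans[(k % 4) - 1]
-- ===== SOURCE B (Python) =====
-- def solve(n, k, x, y):
--     if not n or not k or x < 0 or y < 0:
--         return (0, 0)
--     if x == y:
--         return (x, y) if k <= 0 else (n, n)
--     r = (k - 1) % 4
--     if x > y:
--         d = x - y
--         if r == 0: return (n, n - d)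
--         if r == 1: return (n - d, n)
--         if r == 2: return (n - 2*d, n - d)
--         return (n - d, n - 2*d)
--     else:
--         d = y - x
--         if r == 0: return (n - d, n)
--         if r == 1: return (n - 2*d, n + d)
--         if r == 2: return (n - 4*d, n - d)
--         return (n - 3*d, n - 2*d)
-- ===== Notes on version B (the rewrite author's own statement) =====
-- stated objective: simpler
-- what changed: B replaces A's four-iteration mutable (i,j,dir) simulation loop plus list indexing by a closed-form reflection table: it computes r = (k-1) % 4 and returns the r-th of four directly-derived states in n and d = |x-y|, split on whether x > y or x < y.
-- crash fix: When no guard fires (n != 0, k != 0, x >= 0, y >= 0, x != y) and k <= -4, A raises IndexError on ans[k-1]; B returns the 4-periodic value table[(k-1) % 4]. — e.g. on solve(2, -4, 1, 0): A raises IndexError, B returns (1, 0)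
import Mathlib
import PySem

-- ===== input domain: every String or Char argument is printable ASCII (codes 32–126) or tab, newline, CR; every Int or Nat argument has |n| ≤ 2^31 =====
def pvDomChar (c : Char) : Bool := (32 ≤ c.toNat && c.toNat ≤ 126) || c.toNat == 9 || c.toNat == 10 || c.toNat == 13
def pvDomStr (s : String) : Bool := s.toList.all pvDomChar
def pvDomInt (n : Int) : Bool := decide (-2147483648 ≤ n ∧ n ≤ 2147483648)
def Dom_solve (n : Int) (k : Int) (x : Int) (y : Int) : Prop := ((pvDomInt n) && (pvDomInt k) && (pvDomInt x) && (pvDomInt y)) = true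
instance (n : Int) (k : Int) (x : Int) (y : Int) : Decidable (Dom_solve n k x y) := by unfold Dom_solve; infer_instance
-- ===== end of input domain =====

-- B replaces A's four-step simulation loop by a closed-form reflection table indexed by (k-1) % 4 (objective: simpler).

-- ===== PORT A =====
-- the while-loop of A: 4 iterations over state (i, j, dir), appending to ans
def solveLoop (n : Int) : Nat → Int → Int → Int → List (Int × Int) → List (Int × Int)
  | 0, _, _, _, ans => ans
  | rem + 1, i, j, dir, ans =>
    if dir = 0 then
      let idx := max i j
      let i' := i + (n - idx)
      let j' := j + (n - idx)
      solveLoop n rem i' j' 1 (ans ++ [(i', j')])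
    else if dir = 1 then
      let idx := min i j
      let i' := i - (n - idx)
      let j' := j + (n - idx)
      solveLoop n rem i' j' 2 (ans ++ [(i', j')])
    else if dir = 2 then
      let idx := min i j
      let i' := i - (n - idx)
      let j' := j - (n - idx)
      solveLoop n rem i' j' 3 (ans ++ [(i', j')])
    else
      let idx := max i j
      let i' := i + (n - idx)
      let j' := j - (n - idx)
      solveLoop n rem i' j' 0 (ans ++ [(i', j')])

def solve (n : Int) (k : Int) (x : Int) (y : Int) : Int × Int :=
  let i := x
  let j := y
  if n = 0 ∨ k = 0 ∨ x < 0 ∨ y < 0 then (0, 0)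
  else if i = j ∧ k ≤ 0 then (i, j)
  else if i = j ∧ 0 < k then (n, n)
  else
    let ans := solveLoop n 4 i j 0 []
    if k ≤ 4 then (PySem.List.pyGet? ans (k - 1)).getD (0, 0)
    else (PySem.List.pyGet? ans (PySem.Int.mod k 4 - 1)).getD (0, 0)

-- ===== PORT B =====
def solve_alt (n : Int) (k : Int) (x : Int) (y : Int) : Int × Int :=
  if n = 0 ∨ k = 0 ∨ x < 0 ∨ y < 0 then (0, 0)
  else if x = y then (if k ≤ 0 then (x, y) else (n, n))
  else
    let r := PySem.Int.mod (k - 1) 4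
    if y < x then
      let d := x - y
      if r = 0 then (n, n - d)
      else if r = 1 then (n - d, n)
      else if r = 2 then (n - 2*d, n - d)
      else (n - d, n - 2*d)
    else
      let d := y - x
      if r = 0 then (n - d, n)
      else if r = 1 then (n - 2*d, n + d)
      else if r = 2 then (n - 4*d, n - d)
      else (n - 3*d, n - 2*d)

-- ===== PRECONDITION & SPEC =====
-- Pre_ excludes only the inputs where A raises IndexError: k ≤ -4 while no guard fires (ans[k-1] out of range).
def Pre_solve (n : Int) (k : Int) (x : Int) (y : Int) : Prop :=
  n = 0 ∨ k = 0 ∨ x < 0 ∨ y < 0 ∨ x = y ∨ -3 ≤ k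
instance (n : Int) (k : Int) (x : Int) (y : Int) : Decidable (Pre_solve n k x y) := by unfold Pre_solve; infer_instance
def pvWitness_solve : Int × Int × Int × Int := (7, 3, 5, 2)

-- On k ≤ -4 (guards all passed) A raises IndexError; B returns the 4-periodic extension table[(k-1) % 4].
def Raises_solve (n : Int) (k : Int) (x : Int) (y : Int) : Prop :=
  n ≠ 0 ∧ k ≤ -4 ∧ 0 ≤ x ∧ 0 ≤ y ∧ x ≠ y
instance (n : Int) (k : Int) (x : Int) (y : Int) : Decidable (Raises_solve n k x y) := by unfold Raises_solve; infer_instance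
def pvRaiseWitness_solve : Int × Int × Int × Int := (2, -4, 1, 0)
def pvRaiseWitnessOut_solve : Int × Int := (1, 0)

def Spec_solve (n : Int) (k : Int) (x : Int) (y : Int) (out : Int × Int) : Prop := out = solve_alt n k x y
instance (n : Int) (k : Int) (x : Int) (y : Int) (out : Int × Int) : Decidable (Spec_solve n k x y out) := by unfold Spec_solve; infer_instance

-- ===== CLAIM (what is proved, stated in full; the proofs are below) =====
def Claim_equal_solve : Prop := ∀ (n : Int) (k : Int) (x : Int) (y : Int), Dom_solve n k x y → Pre_solve n k x y → Spec_solve n k x y (solve n k x y)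
def Claim_raises_solve : Prop := (∀ (n : Int) (k : Int) (x : Int) (y : Int), Dom_solve n k x y → Raises_solve n k x y → ¬ Pre_solve n k x y) ∧ (Dom_solve (pvRaiseWitness_solve.1) (pvRaiseWitness_solve.2.1) (pvRaiseWitness_solve.2.2.1) (pvRaiseWitness_solve.2.2.2) ∧ Raises_solve (pvRaiseWitness_solve.1) (pvRaiseWitness_solve.2.1) (pvRaiseWitness_solve.2.2.1) (pvRaiseWitness_solve.2.2.2) ∧ solve_alt (pvRaiseWitness_solve.1) (pvRaiseWitness_solve.2.1) (pvRaiseWitness_solve.2.2.1) (pvRaiseWitness_solve.2.2.2) = pvRaiseWitnessOut_solve)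

-- ===== LEMMAS AND PROOFS =====

lemma step0 (n : Int) (rem : Nat) (i j : Int) (ans : List (Int × Int)) :
    solveLoop n (rem+1) i j 0 ans
      = solveLoop n rem (i + (n - max i j)) (j + (n - max i j)) 1 (ans ++ [(i + (n - max i j), j + (n - max i j))]) := rfl
lemma step1 (n : Int) (rem : Nat) (i j : Int) (ans : List (Int × Int)) :
    solveLoop n (rem+1) i j 1 ans
      = solveLoop n rem (i - (n - min i j)) (j + (n - min i j)) 2 (ans ++ [(i - (n - min i j), j + (n - min i j))]) := rfl
lemma step2 (n : Int) (rem : Nat) (i j : Int) (ans : List (Int × Int)) :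
    solveLoop n (rem+1) i j 2 ans
      = solveLoop n rem (i - (n - min i j)) (j - (n - min i j)) 3 (ans ++ [(i - (n - min i j), j - (n - min i j))]) := rfl
lemma step3 (n : Int) (rem : Nat) (i j : Int) (ans : List (Int × Int)) :
    solveLoop n (rem+1) i j 3 ans
      = solveLoop n rem (i + (n - max i j)) (j - (n - max i j)) 0 (ans ++ [(i + (n - max i j), j - (n - max i j))]) := rfl

lemma loop_gt (n x y : Int) (h : y < x) :
    solveLoop n 4 x y 0 [] =
      [(n, n - (x - y)), (n - (x - y), n), (n - 2*(x - y), n - (x - y)), (n - (x - y), n - 2*(x - y))] := by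
  rw [show (4:Nat) = 3+1 from rfl, step0]
  rw [show x + (n - max x y) = n from by omega, show y + (n - max x y) = n - (x - y) from by omega]
  rw [show (3:Nat) = 2+1 from rfl, step1]
  rw [show n - (n - min n (n - (x - y))) = n - (x - y) from by omega,
      show n - (x - y) + (n - min n (n - (x - y))) = n from by omega]
  rw [show (2:Nat) = 1+1 from rfl, step2]
  rw [show n - (x - y) - (n - min (n - (x - y)) n) = n - 2*(x - y) from by omega,
      show n - (n - min (n - (x - y)) n) = n - (x - y) from by omega]
  rw [show (1:Nat) = 0+1 from rfl, step3]
  rw [show n - 2*(x - y) + (n - max (n - 2*(x - y)) (n - (x - y))) = n - (x - y) from by omega,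
      show n - (x - y) - (n - max (n - 2*(x - y)) (n - (x - y))) = n - 2*(x - y) from by omega]
  rfl

lemma loop_lt (n x y : Int) (h : x < y) :
    solveLoop n 4 x y 0 [] =
      [(n - (y - x), n), (n - 2*(y - x), n + (y - x)), (n - 4*(y - x), n - (y - x)), (n - 3*(y - x), n - 2*(y - x))] := by
  rw [show (4:Nat) = 3+1 from rfl, step0]
  rw [show x + (n - max x y) = n - (y - x) from by omega, show y + (n - max x y) = n from by omega]
  rw [show (3:Nat) = 2+1 from rfl, step1]
  rw [show n - (y - x) - (n - min (n - (y - x)) n) = n - 2*(y - x) from by omega,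
      show n + (n - min (n - (y - x)) n) = n + (y - x) from by omega]
  rw [show (2:Nat) = 1+1 from rfl, step2]
  rw [show n - 2*(y - x) - (n - min (n - 2*(y - x)) (n + (y - x))) = n - 4*(y - x) from by omega,
      show n + (y - x) - (n - min (n - 2*(y - x)) (n + (y - x))) = n - (y - x) from by omega]
  rw [show (1:Nat) = 0+1 from rfl, step3]
  rw [show n - 4*(y - x) + (n - max (n - 4*(y - x)) (n - (y - x))) = n - 3*(y - x) from by omega,
      show n - (y - x) - (n - max (n - 4*(y - x)) (n - (y - x))) = n - 2*(y - x) from by omega]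
  rfl


-- ===== VERDICT (by name: the statement is the Claim_ definition above) =====
theorem solve_spec : Claim_equal_solve := by
  unfold Claim_equal_solve
  intro n k x y _ hpre
  unfold Spec_solve
  simp only [solve, solve_alt]
  by_cases hg : n = 0 ∨ k = 0 ∨ x < 0 ∨ y < 0
  · rw [if_pos hg, if_pos hg]
  · rw [if_neg hg, if_neg hg]
    by_cases hxy : x = y
    · subst hxy
      by_cases hk0 : k ≤ 0
      · rw [if_pos ⟨rfl, hk0⟩, if_pos rfl, if_pos hk0]
      · rw [if_neg (fun hc => hk0 hc.2), if_pos ⟨rfl, by omega⟩, if_pos rfl, if_neg hk0]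
    · have hk3 : -3 ≤ k := by unfold Pre_solve at hpre; omega
      have hk0 : ¬ k = 0 := by omega
      rw [if_neg (fun hc => hxy hc.1), if_neg (fun hc => hxy hc.1), if_neg hxy]
      rcases lt_or_gt_of_ne hxy with hlt | hgt
      · rw [loop_lt n x y hlt, if_neg (by omega : ¬ y < x)]
        by_cases hk4 : k ≤ 4
        · interval_cases k <;> first | omega | rfl
        · rw [if_neg hk4]
          simp only [PySem.Int.mod_eq_emod_of_pos (show (0:Int) < 4 by norm_num)]
          have h4 : k % 4 = 0 ∨ k % 4 = 1 ∨ k % 4 = 2 ∨ k % 4 = 3 := by omega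
          rcases h4 with h | h | h | h <;>
            [rw [h, show (k-1) % 4 = 3 from by omega];
             rw [h, show (k-1) % 4 = 0 from by omega];
             rw [h, show (k-1) % 4 = 1 from by omega];
             rw [h, show (k-1) % 4 = 2 from by omega]] <;> rfl
      · rw [loop_gt n x y hgt, if_pos hgt]
        by_cases hk4 : k ≤ 4
        · interval_cases k <;> first | omega | rfl
        · rw [if_neg hk4]
          simp only [PySem.Int.mod_eq_emod_of_pos (show (0:Int) < 4 by norm_num)]
          have h4 : k % 4 = 0 ∨ k % 4 = 1 ∨ k % 4 = 2 ∨ k % 4 = 3 := by omega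
          rcases h4 with h | h | h | h <;>
            [rw [h, show (k-1) % 4 = 3 from by omega];
             rw [h, show (k-1) % 4 = 0 from by omega];
             rw [h, show (k-1) % 4 = 1 from by omega];
             rw [h, show (k-1) % 4 = 2 from by omega]] <;> rfl

@[simp]
theorem solve_raises : Claim_raises_solve := by
  unfold Claim_raises_solve
  constructor
  · intro n k x y _ hr
    unfold Pre_solve Raises_solve at *
    omega
  · refine ⟨by decide, by decide, by decide⟩
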